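-- pv_equiv track=rewrite | github.com/earthPerson-001/algorithms-lab | src/lab2/generate_array_for_various_cases.py | generate_array_for_merge_sort_worst_case
-- ===== SOURCE A (Python) =====
-- def generate_array_for_merge_sort_worst_case(arr: list, sort=True):
--     """
--     For the worst case of merge sort, the left and right sub-array involved
--     in merge operation should store alternate elements of the sorted array.
--     """
--
--     n = len(arr)
--
--     if n <= 1:
--         return arr
--
--     if sort:
--         sorted_array = sorted(arr)
--     else:
--         sorted_array = arr.copy()
--
--     if n == 2:
--         sorted_array[0], sorted_array[1] = sorted_array[1], sorted_array[0]
--         return sorted_array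
--
--     left_arr = sorted_array[::2]  # take elements at even indices
--     right_arr = sorted_array[1::2]  # take elements at odd indices
--
--     return generate_array_for_merge_sort_worst_case(
--         left_arr, sort=False
--     ) + generate_array_for_merge_sort_worst_case(right_arr, sort=False)
-- ===== SOURCE B (Python) =====
-- def generate_array_for_merge_sort_worst_case(arr: list, sort=True):
--     n = len(arr)
--     if n <= 1:
--         return arr
--     segments = [sorted(arr) if sort else arr.copy()]
--     while any(len(s) > 2 for s in segments):
--         new_segments = []
--         for s in segments:
--             if len(s) > 2:
--                 new_segments.append(s[::2])
--                 new_segments.append(s[1::2])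
--             else:
--                 new_segments.append(s)
--         segments = new_segments
--     result = []
--     for s in segments:
--         if len(s) == 2:
--             result.extend(reversed(s))
--         else:
--             result.extend(s)
--     return result
-- ===== Notes on version B (the rewrite author's own statement) =====
-- stated objective: alternative
-- what changed: Replaces A's top-down binary recursion (recurse on even-index and odd-index slices, concatenate) by an iterative worklist: repeatedly refine a list of segments until all have length <= 2, then concatenate with length-2 segments swapped.
import Mathlib
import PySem

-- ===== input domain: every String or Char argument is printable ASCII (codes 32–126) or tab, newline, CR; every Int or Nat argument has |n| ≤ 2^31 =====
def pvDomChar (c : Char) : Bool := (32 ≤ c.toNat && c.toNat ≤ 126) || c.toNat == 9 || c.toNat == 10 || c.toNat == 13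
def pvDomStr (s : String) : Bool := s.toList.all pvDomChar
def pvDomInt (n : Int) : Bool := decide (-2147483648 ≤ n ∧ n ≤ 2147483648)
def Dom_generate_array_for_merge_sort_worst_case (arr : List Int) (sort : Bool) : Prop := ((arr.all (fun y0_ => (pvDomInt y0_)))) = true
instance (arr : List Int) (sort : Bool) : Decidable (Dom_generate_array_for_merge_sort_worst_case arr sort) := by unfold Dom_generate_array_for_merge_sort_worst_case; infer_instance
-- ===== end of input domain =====

-- B replaces A's binary recursion by an iterative segment-refinement worklist (same result; objective: alternative decomposition).

-- ===== PORT A =====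
-- xs[::2] (every even index): step-2 slice, ported by hand (exact for a full positive-step-2 slice)
def pvEvens : List Int → List Int
  | [] => []
  | [a] => [a]
  | a :: _ :: t => a :: pvEvens t

-- xs[1::2] = every odd index = even indices of the tail (exact)
def pvOdds (xs : List Int) : List Int := pvEvens xs.tail

theorem pvEvens_length (xs : List Int) : (pvEvens xs).length = (xs.length + 1) / 2 := by
  induction xs using pvEvens.induct <;> simp [pvEvens, *] <;> omega

def generate_array_for_merge_sort_worst_case (arr : List Int) (sort : Bool) : List Int :=
  let n := arr.length
  if n ≤ 1 then arr
  else
    let sorted_array := if sort then PySem.List.sorted arr (fun x => x) false else arr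
    if n = 2 then
      -- sorted_array[0], sorted_array[1] = sorted_array[1], sorted_array[0] (n = 2 here)
      match sorted_array with
      | a :: b :: t => b :: a :: t
      | l => l
    else
      let left_arr := pvEvens sorted_array
      let right_arr := pvOdds sorted_array
      generate_array_for_merge_sort_worst_case left_arr false ++
        generate_array_for_merge_sort_worst_case right_arr false
termination_by arr.length
decreasing_by
  all_goals cases sort
  all_goals simp only [pvOdds, pvEvens_length, List.length_tail, reduceDIte,
    Bool.false_eq_true, PySem.List.length_sorted]
  all_goals omega

-- ===== PORT B =====
-- s[::2] / s[1::2] for B (step-2 slices, ported by hand, exact)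
def pvAltEvens (s : List Int) : List Int :=
  match s with
  | [] => []
  | a :: t => a :: pvAltEvens t.tail
termination_by s.length
decreasing_by simp [List.length_tail]

def pvAltOdds (s : List Int) : List Int := pvAltEvens s.tail

-- one pass of the while-loop body: refine every segment longer than 2
def pvAltStep (L : List (List Int)) : List (List Int) :=
  L.flatMap fun s => if 2 < s.length then [pvAltEvens s, pvAltOdds s] else [s]

def pvMaxLen (L : List (List Int)) : Nat := L.foldr (fun s m => max s.length m) 0

theorem pvAltEvens_length (xs : List Int) : (pvAltEvens xs).length = (xs.length + 1) / 2 := by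
  induction xs using pvAltEvens.induct with
  | case1 => simp [pvAltEvens.eq_def]
  | case2 a t ih => rw [pvAltEvens.eq_def]
                    simp only [List.length_cons, List.length_tail, ih]
                    omega

theorem pvLen_le_maxLen {s : List Int} {L : List (List Int)} (h : s ∈ L) :
    s.length ≤ pvMaxLen L := by
  induction L with
  | nil => cases h
  | cons t ts ih =>
    simp [pvMaxLen] at *
    rcases h with h | h
    · subst h; omega
    · have := ih h; omega

theorem pvMaxLen_lt_of_all {L : List (List Int)} {M : Nat}
    (h : ∀ s ∈ L, s.length < M) (hM : 0 < M) : pvMaxLen L < M := by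
  induction L with
  | nil => simpa [pvMaxLen]
  | cons t ts ih =>
    simp [pvMaxLen] at *
    exact ⟨h.1, ih h.2⟩

theorem pvMaxLen_step_lt (L : List (List Int)) (h : L.any (fun s => decide (2 < s.length)) = true) :
    pvMaxLen (pvAltStep L) < pvMaxLen L := by
  simp at h
  obtain ⟨s, hs, hlen⟩ := h
  have hM : 3 ≤ pvMaxLen L := le_trans hlen (pvLen_le_maxLen hs)
  apply pvMaxLen_lt_of_all _ (by omega)
  intro s' hs'
  simp [pvAltStep] at hs'
  obtain ⟨t, ht, hmem⟩ := hs'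
  have htM : t.length ≤ pvMaxLen L := pvLen_le_maxLen ht
  by_cases h2 : 2 < t.length
  · simp [h2] at hmem
    rcases hmem with h' | h' <;> subst h' <;>
      simp [pvAltEvens_length, pvAltOdds, pvAltEvens_length, List.length_tail] <;> omega
  · simp [h2] at hmem
    subst hmem; omega

def pvAltLoop (L : List (List Int)) : List (List Int) :=
  if h : L.any (fun s => decide (2 < s.length)) = true then pvAltLoop (pvAltStep L) else L
termination_by pvMaxLen L
decreasing_by exact pvMaxLen_step_lt L h

-- final pass: concatenate segments, swapping each length-2 segment
def pvSwap2 (s : List Int) : List Int :=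
  if s.length = 2 then s.reverse else s

def pvAltFinish (L : List (List Int)) : List Int := L.flatMap pvSwap2

def generate_array_for_merge_sort_worst_case_alt (arr : List Int) (sort : Bool) : List Int :=
  if arr.length ≤ 1 then arr
  else pvAltFinish (pvAltLoop [if sort then PySem.List.sorted arr (fun x => x) false else arr])

-- ===== PRECONDITION & SPEC =====
def Spec_generate_array_for_merge_sort_worst_case (arr : List Int) (sort : Bool) (out : List Int) : Prop := out = generate_array_for_merge_sort_worst_case_alt arr sort
instance (arr : List Int) (sort : Bool) (out : List Int) : Decidable (Spec_generate_array_for_merge_sort_worst_case arr sort out) := by unfold Spec_generate_array_for_merge_sort_worst_case; infer_instance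

-- ===== CLAIM (what is proved, stated in full; the proofs are below) =====
def Claim_equal_generate_array_for_merge_sort_worst_case : Prop := ∀ (arr : List Int) (sort : Bool), Dom_generate_array_for_merge_sort_worst_case arr sort → Spec_generate_array_for_merge_sort_worst_case arr sort (generate_array_for_merge_sort_worst_case arr sort)

-- ===== LEMMAS AND PROOFS =====

theorem pvAltEvens_eq_pvEvens (xs : List Int) : pvAltEvens xs = pvEvens xs := by
  induction xs using pvEvens.induct with
  | case1 => simp [pvAltEvens.eq_def, pvEvens]
  | case2 a => simp [pvAltEvens.eq_def, pvEvens]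
  | case3 a b t ih => rw [pvAltEvens.eq_def, pvEvens]; simp only [List.tail_cons]
                      exact congrArg _ ih

-- A on a short segment (sort=False) is the finish-pass action on it
theorem pvA_short (s : List Int) (h : s.length ≤ 2) :
    generate_array_for_merge_sort_worst_case s false = pvSwap2 s := by
  match s with
  | [] => rw [generate_array_for_merge_sort_worst_case]; rfl
  | [a] => rw [generate_array_for_merge_sort_worst_case]; rfl
  | [a, b] => rw [generate_array_for_merge_sort_worst_case]; rfl
  | a :: b :: c :: t => simp at h

-- A on a long segment (sort=False) unfolds to its two half recursions
theorem pvA_long (s : List Int) (h : 2 < s.length) :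
    generate_array_for_merge_sort_worst_case s false =
      generate_array_for_merge_sort_worst_case (pvEvens s) false ++
        generate_array_for_merge_sort_worst_case (pvOdds s) false := by
  rw [generate_array_for_merge_sort_worst_case]
  simp only [Bool.false_eq_true, if_false]
  rw [if_neg (by omega), if_neg (by omega)]

-- one refinement pass preserves the concatenation of A-values
theorem pvFlatMap_step (L : List (List Int)) :
    (pvAltStep L).flatMap (fun s => generate_array_for_merge_sort_worst_case s false) =
      L.flatMap (fun s => generate_array_for_merge_sort_worst_case s false) := by
  induction L with
  | nil => rfl
  | cons t ts ih =>
    simp only [pvAltStep, List.flatMap_cons] at *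
    rw [List.flatMap_append, ih]
    by_cases h2 : 2 < t.length
    · simp [h2, pvA_long t h2, pvAltEvens_eq_pvEvens, pvAltOdds, pvOdds]
    · simp [h2]

-- the whole loop + finish computes the concatenation of A-values of the segments
theorem pvLoop_finish (L : List (List Int)) :
    pvAltFinish (pvAltLoop L) =
      L.flatMap (fun s => generate_array_for_merge_sort_worst_case s false) := by
  induction L using pvAltLoop.induct with
  | case1 L h ih =>
    rw [pvAltLoop, dif_pos h, ih, pvFlatMap_step]
  | case2 L h =>
    rw [pvAltLoop, dif_neg h]
    simp at h
    unfold pvAltFinish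
    apply List.flatMap_congr
    intro s hs
    exact (pvA_short s (h s hs)).symm

-- for any list of length ≥ 2, A on it equals A (sort=False) on its sorted/copied version
theorem pvA_desort (arr : List Int) (sort : Bool) (h : 1 < arr.length) :
    generate_array_for_merge_sort_worst_case arr sort =
      generate_array_for_merge_sort_worst_case
        (if sort then PySem.List.sorted arr (fun x => x) false else arr) false := by
  have hlen : (if sort then PySem.List.sorted arr (fun x => x) false else arr).length = arr.length := by
    split <;> simp [PySem.List.length_sorted]
  rw [generate_array_for_merge_sort_worst_case]
  conv_rhs => rw [generate_array_for_merge_sort_worst_case]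
  simp only [hlen, Bool.false_eq_true, if_false]
  split_ifs <;> first | omega | rfl

-- ===== VERDICT (by name: the statement is the Claim_ definition above) =====
theorem generate_array_for_merge_sort_worst_case_spec : Claim_equal_generate_array_for_merge_sort_worst_case := by
  intro arr sort _
  unfold Spec_generate_array_for_merge_sort_worst_case generate_array_for_merge_sort_worst_case_alt
  by_cases h1 : arr.length ≤ 1
  · rw [if_pos h1, generate_array_for_merge_sort_worst_case]
    simp [h1]
  · rw [if_neg h1, pvLoop_finish]
    simp only [List.flatMap_cons, List.flatMap_nil, List.append_nil]
    exact pvA_desort arr sort (by omega)
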